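-- pv_equiv track=rewrite | github.com/Taranpreet99/PythonPracticeNew | Exercise5/iterations.py | count_words_sam
-- ===== SOURCE A (Python) =====
-- def count_words_sam(list):
--     count = 0
--     total_words = 0
--     for i in list:
--         if count == 0:
--             if i == "sam":
--                 count = count + 1
--                 total_words = total_words + 1
--             else:
--                 total_words = total_words + 1
--     return total_words
-- ===== SOURCE B (Python) =====
-- def count_words_sam(list):
--     # Build the answer back-to-front: scanning from the end, a "sam" resets the
--     # running count to 1 (words after the first "sam" never count), any other
--     # word adds one on top of whatever the suffix contributed.
--     r = 0
--     for w in reversed(list):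
--         r = 1 if w == "sam" else 1 + r
--     return r
-- ===== Notes on version B (the rewrite author's own statement) =====
-- stated objective: alternative
-- what changed: Replaced the forward flag+accumulator scan with a back-to-front fold: traversing from the end, 'sam' resets the running count to 1 and any other word adds 1, so the answer is assembled from the suffix instead of tracked with per-element state.
import Mathlib
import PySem

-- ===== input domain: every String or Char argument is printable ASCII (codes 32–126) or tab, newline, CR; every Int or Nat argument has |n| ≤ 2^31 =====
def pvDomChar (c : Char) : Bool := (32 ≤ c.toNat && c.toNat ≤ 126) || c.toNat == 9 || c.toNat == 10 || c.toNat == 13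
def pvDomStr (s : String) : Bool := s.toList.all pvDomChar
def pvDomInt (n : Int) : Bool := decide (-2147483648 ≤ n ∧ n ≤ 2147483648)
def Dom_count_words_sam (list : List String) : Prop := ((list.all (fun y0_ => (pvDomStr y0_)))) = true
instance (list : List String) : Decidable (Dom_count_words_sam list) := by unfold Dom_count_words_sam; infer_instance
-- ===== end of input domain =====

-- B replaces A's forward flag+accumulator scan with a back-to-front fold ("sam" resets the count to 1, other words add 1): alternative decomposition, same cost.


-- ===== PORT A =====
def count_words_sam (list : List String) : Int :=
  (list.foldl (fun (st : Int × Int) i =>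
      if st.1 = 0 then
        if i = "sam" then (st.1 + 1, st.2 + 1) else (st.1, st.2 + 1)
      else st) (0, 0)).2

-- ===== PORT B =====
def count_words_sam_alt (list : List String) : Int :=
  list.reverse.foldl (fun r w => if w = "sam" then 1 else 1 + r) 0

-- ===== PRECONDITION & SPEC =====
def Spec_count_words_sam (list : List String) (out : Int) : Prop := out = count_words_sam_alt list
instance (list : List String) (out : Int) : Decidable (Spec_count_words_sam list out) := by unfold Spec_count_words_sam; infer_instance

-- ===== CLAIM =====
def Claim_equal_count_words_sam : Prop := ∀ (list : List String), Dom_count_words_sam list → Spec_count_words_sam list (count_words_sam list)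

-- ===== LEMMAS AND PROOFS =====
lemma cws_done (l : List String) (a b : Int) (ha : a ≠ 0) :
    (l.foldl (fun (st : Int × Int) i =>
      if st.1 = 0 then
        if i = "sam" then (st.1 + 1, st.2 + 1) else (st.1, st.2 + 1)
      else st) (a, b)) = (a, b) := by
  induction l with
  | nil => rfl
  | cons y ys ihy => simp [List.foldl_cons, if_neg ha, ihy]

lemma cws_alt_cons (x : String) (xs : List String) :
    count_words_sam_alt (x :: xs) =
      if x = "sam" then 1 else 1 + count_words_sam_alt xs := by
  unfold count_words_sam_alt
  simp [List.foldl_reverse]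

lemma cws_loop (l : List String) (t : Int) :
    (l.foldl (fun (st : Int × Int) i =>
      if st.1 = 0 then
        if i = "sam" then (st.1 + 1, st.2 + 1) else (st.1, st.2 + 1)
      else st) (0, t)).2 = t + count_words_sam_alt l := by
  induction l generalizing t with
  | nil => simp [count_words_sam_alt]
  | cons x xs ih =>
    rw [cws_alt_cons]
    by_cases hx : x = "sam"
    · subst hx
      simp only [List.foldl_cons, reduceIte]
      rw [show ((0:Int)+1, t+1) = (1, t+1) by norm_num,
          cws_done xs 1 (t + 1) (by norm_num)]
    · simp only [List.foldl_cons, reduceIte, if_neg hx]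
      rw [ih (t + 1)]
      ring

-- ===== VERDICT =====
theorem count_words_sam_spec : Claim_equal_count_words_sam := by
  intro l _
  unfold Spec_count_words_sam count_words_sam
  rw [cws_loop]
  ring
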